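-- pv_equiv track=rewrite | github.com/blaarb/geekbrains-python-basics | Lesson8/task3.py | check_if_num
-- ===== SOURCE A (Python) =====
-- def check_if_num(input_string):
--     if input_string == "stop":
--         return True
--     stripped_string = input_string.lstrip("-")
--     i = 0
--     while i <= len(stripped_string) - 1:
--         if stripped_string[i] not in ("0", "1", "2", "3", "4", "5", "6", "7", "8", "9"):
--             return False
--         i += 1
--     return True
-- ===== SOURCE B (Python) =====
-- def check_if_num(input_string):
--     if input_string == "stop":
--         return True
--     s = input_string.lstrip("-")
--     return s == "" or ("0" <= min(s) and max(s) <= "9")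
-- ===== Notes on version B (the rewrite author's own statement) =====
-- stated objective: alternative
-- what changed: Replaces the per-character digit-membership while loop with a single min/max range check on the stripped string, exploiting the contiguity of the decimal-digit codepoints.
import Mathlib
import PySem

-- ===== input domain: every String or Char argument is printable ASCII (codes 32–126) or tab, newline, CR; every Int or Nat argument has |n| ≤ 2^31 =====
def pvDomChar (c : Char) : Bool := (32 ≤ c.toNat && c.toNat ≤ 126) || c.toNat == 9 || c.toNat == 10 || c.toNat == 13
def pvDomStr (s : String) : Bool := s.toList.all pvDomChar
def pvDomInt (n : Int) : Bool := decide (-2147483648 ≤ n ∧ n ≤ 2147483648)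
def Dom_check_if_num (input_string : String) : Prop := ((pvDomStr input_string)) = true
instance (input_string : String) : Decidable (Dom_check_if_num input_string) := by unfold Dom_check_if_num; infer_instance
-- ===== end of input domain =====

-- B replaces A's per-character digit-membership loop with a min/max range check ('0' ≤ min s ∧ max s ≤ '9'), exploiting contiguity of the digit codepoints; return value only.

-- ===== PORT A =====
-- s.lstrip("-") ported by hand as dropWhile (· == '-'): exact, lstrip(chars) drops leading characters from the set {'-'}
def pvLstripDash (cs : List Char) : List Char := cs.dropWhile (· == '-')

-- the while loop over indices 0 .. len-1, checking membership in the tuple of digit characters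
def pvLoopA : List Char → Bool
  | [] => true
  | c :: rest =>
    if !(['0','1','2','3','4','5','6','7','8','9'].contains c) then false
    else pvLoopA rest

def check_if_num (input_string : String) : Bool :=
  if input_string == "stop" then true
  else pvLoopA (pvLstripDash input_string.toList)

-- ===== PORT B =====
def check_if_num_alt (input_string : String) : Bool :=
  if input_string == "stop" then true
  else
    let s := pvLstripDash input_string.toList
    s == [] ||
      (match PySem.List.min? s (fun x => x), PySem.List.max? s (fun x => x) with
       | some mn, some mx => decide ('0' ≤ mn) && decide (mx ≤ '9')
       | _, _ => false)

-- ===== PRECONDITION & SPEC =====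
def Spec_check_if_num (input_string : String) (out : Bool) : Prop := out = check_if_num_alt input_string
instance (input_string : String) (out : Bool) : Decidable (Spec_check_if_num input_string out) := by unfold Spec_check_if_num; infer_instance

-- ===== CLAIM (what is proved, stated in full; the proofs are below) =====
def Claim_equal_check_if_num : Prop := ∀ (input_string : String), Dom_check_if_num input_string → Spec_check_if_num input_string (check_if_num input_string)

-- ===== LEMMAS AND PROOFS =====
theorem char_eq_of_toNat {c d : Char} (h : c.toNat = d.toNat) : c = d :=
  Char.ext (UInt32.toNat_inj.mp h)

theorem char_le_iff (c d : Char) : (c ≤ d) ↔ c.toNat ≤ d.toNat := by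
  rw [Char.le_def, UInt32.le_iff_toNat_le]; exact Iff.rfl

theorem mem_digits_iff (c : Char) :
    (['0','1','2','3','4','5','6','7','8','9'].contains c) = true ↔ ('0' ≤ c ∧ c ≤ '9') := by
  simp only [List.contains_eq_mem, decide_eq_true_eq, List.mem_cons, List.not_mem_nil, or_false,
    char_le_iff]
  constructor
  · rintro (h|h|h|h|h|h|h|h|h|h) <;> subst h <;> decide
  · rintro ⟨h1, h2⟩
    have hn : c.toNat = 48 ∨ c.toNat = 49 ∨ c.toNat = 50 ∨ c.toNat = 51 ∨ c.toNat = 52 ∨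
        c.toNat = 53 ∨ c.toNat = 54 ∨ c.toNat = 55 ∨ c.toNat = 56 ∨ c.toNat = 57 := by
      have h1' : ('0').toNat ≤ c.toNat := h1
      have h2' : c.toNat ≤ ('9').toNat := h2
      simp only [show ('0').toNat = 48 from rfl, show ('9').toNat = 57 from rfl] at h1' h2'
      omega
    rcases hn with h|h|h|h|h|h|h|h|h|h
    · exact .inl <| char_eq_of_toNat (h.trans (by decide))
    · exact .inr <| .inl <| char_eq_of_toNat (h.trans (by decide))
    · exact .inr <| .inr <| .inl <| char_eq_of_toNat (h.trans (by decide))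
    · exact .inr <| .inr <| .inr <| .inl <| char_eq_of_toNat (h.trans (by decide))
    · exact .inr <| .inr <| .inr <| .inr <| .inl <| char_eq_of_toNat (h.trans (by decide))
    · exact .inr <| .inr <| .inr <| .inr <| .inr <| .inl <| char_eq_of_toNat (h.trans (by decide))
    · exact .inr <| .inr <| .inr <| .inr <| .inr <| .inr <| .inl <| char_eq_of_toNat (h.trans (by decide))
    · exact .inr <| .inr <| .inr <| .inr <| .inr <| .inr <| .inr <| .inl <| char_eq_of_toNat (h.trans (by decide))
    · exact .inr <| .inr <| .inr <| .inr <| .inr <| .inr <| .inr <| .inr <| .inl <| char_eq_of_toNat (h.trans (by decide))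
    · exact .inr <| .inr <| .inr <| .inr <| .inr <| .inr <| .inr <| .inr <| .inr <| char_eq_of_toNat (h.trans (by decide))

theorem pvLoopA_eq_all (cs : List Char) :
    pvLoopA cs = cs.all (fun c => ['0','1','2','3','4','5','6','7','8','9'].contains c) := by
  induction cs with
  | nil => rfl
  | cons c rest ih =>
    simp only [pvLoopA, List.all_cons, ih]
    cases h : (['0','1','2','3','4','5','6','7','8','9'].contains c) with
    | false => simp
    | true => simp

theorem pvLoop_eq_range (cs : List Char) :
    pvLoopA cs =
      (cs == [] ||
        (match PySem.List.min? cs (fun x => x), PySem.List.max? cs (fun x => x) with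
         | some mn, some mx => decide ('0' ≤ mn) && decide (mx ≤ '9')
         | _, _ => false)) := by
  rw [pvLoopA_eq_all]
  cases cs with
  | nil => rfl
  | cons c t =>
    have hmin : PySem.List.min? (c :: t) (fun x => x) = some (t.foldl min c) :=
      PySem.List.min?_id_cons c t
    have hmax : PySem.List.max? (c :: t) (fun x => x) = some (t.foldl max c) :=
      PySem.List.max?_id_cons c t
    have hminmem : t.foldl min c ∈ c :: t := PySem.List.min?_mem hmin
    have hmaxmem : t.foldl max c ∈ c :: t := PySem.List.max?_mem hmax
    have hminmin : ∀ y ∈ c :: t, t.foldl min c ≤ y := fun y hy => PySem.List.min?_isMin hmin y hy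
    have hmaxmax : ∀ y ∈ c :: t, y ≤ t.foldl max c := fun y hy => PySem.List.max?_isMax hmax y hy
    rw [hmin, hmax]
    simp only [show ((c :: t : List Char) == []) = false from rfl, Bool.false_or]
    rw [Bool.eq_iff_iff, List.all_eq_true, Bool.and_eq_true, decide_eq_true_eq, decide_eq_true_eq]
    constructor
    · intro h
      exact ⟨((mem_digits_iff _).mp (h _ hminmem)).1, ((mem_digits_iff _).mp (h _ hmaxmem)).2⟩
    · rintro ⟨h0, h9⟩ x hx
      exact (mem_digits_iff x).mpr ⟨le_trans h0 (hminmin x hx), le_trans (hmaxmax x hx) h9⟩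

-- ===== VERDICT (by name: the statement is the Claim_ definition above) =====
theorem check_if_num_spec : Claim_equal_check_if_num := by
  intro s _
  unfold Spec_check_if_num check_if_num check_if_num_alt
  by_cases h : s == "stop"
  · simp [h]
  · simp only [h, Bool.false_eq_true, if_false]
    exact pvLoop_eq_range _
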